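-- pv_equiv track=rewrite | github.com/paloblanco/adventofcode2024 | day12.py | crawl_plot
-- ===== SOURCE A (Python) =====
-- def crawl_plot(gardens: list[list[str]], r: int, c: int, visited: set|None = None ) -> tuple[int,int]:
--     val = gardens[r][c]
--     if not visited: visited = set()
--     area = 1
--     borders = 0
--     visited.add((r,c))
--     for dr,dc in [(-1,0),(0,-1),(0,1),(1,0)]:
--         rnew,cnew = r+dr,c+dc
--         if (rnew,cnew) in visited: continue
--         if (rnew<0 or rnew >= len(gardens) or
--             cnew<0 or cnew >= len(gardens[0]) or
--             gardens[rnew][cnew] != val):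
--             borders += 1
--         else:
--             area_extra, borders_extra = crawl_plot(gardens,rnew,cnew,visited)
--             area += area_extra
--             borders += borders_extra
--     gardens[r][c] = "."
--     return area, borders
-- ===== SOURCE B (Python) =====
-- def crawl_plot(gardens: list[list[str]], r: int, c: int, visited: set | None = None) -> tuple[int, int]:
--     val = gardens[r][c]
--     if not visited:
--         visited = set()
--     visited.add((r, c))
--     area = 1
--     borders = 0
--     region = [(r, c)]
--     stack = [(r + dr, c + dc) for dr, dc in [(1, 0), (0, 1), (0, -1), (-1, 0)]]
--     while stack:
--         rn, cn = stack.pop()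
--         if (rn, cn) in visited:
--             continue
--         if (rn < 0 or rn >= len(gardens) or
--                 cn < 0 or cn >= len(gardens[0]) or
--                 gardens[rn][cn] != val):
--             borders += 1
--         else:
--             visited.add((rn, cn))
--             area += 1
--             region.append((rn, cn))
--             stack.extend((rn + dr, cn + dc) for dr, dc in [(1, 0), (0, 1), (0, -1), (-1, 0)])
--     for rr, cc in region:
--         gardens[rr][cc] = "."
--     return area, borders
-- ===== Notes on version B (the rewrite author's own statement) =====
-- stated objective: idiomatic
-- what changed: The recursive flood fill is replaced by an iterative depth-first traversal with an explicit work stack of pending neighbour coordinates; the region is collected in a list and the grid cells are blanked at the end instead of on recursion unwind.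
-- outside the precondition, e.g. on crawl_plot([['a', 'b'], ['c']], 0, 0, None): A returns (1, 4), B returns (1, 4)
import Mathlib
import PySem

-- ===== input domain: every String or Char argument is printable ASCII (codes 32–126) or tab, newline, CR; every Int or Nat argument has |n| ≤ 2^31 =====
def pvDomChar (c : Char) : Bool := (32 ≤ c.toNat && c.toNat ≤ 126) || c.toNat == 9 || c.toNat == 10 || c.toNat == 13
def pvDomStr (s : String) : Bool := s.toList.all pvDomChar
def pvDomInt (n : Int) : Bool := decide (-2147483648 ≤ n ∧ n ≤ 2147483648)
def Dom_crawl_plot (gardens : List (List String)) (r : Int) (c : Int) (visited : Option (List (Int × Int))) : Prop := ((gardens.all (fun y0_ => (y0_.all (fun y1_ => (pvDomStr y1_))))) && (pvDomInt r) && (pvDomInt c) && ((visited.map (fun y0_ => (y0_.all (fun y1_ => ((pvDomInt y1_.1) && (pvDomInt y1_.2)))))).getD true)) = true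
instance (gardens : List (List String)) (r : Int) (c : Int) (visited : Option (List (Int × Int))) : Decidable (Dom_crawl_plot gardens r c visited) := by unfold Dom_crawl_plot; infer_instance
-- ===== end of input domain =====

-- B replaces A's recursive flood fill by an iterative DFS with an explicit work stack; equivalence is
-- about the RETURN value only (both Pythons mutate `gardens` (region cells set to ".") and `visited` identically).


-- shared literal pieces of both Pythons: the direction list and the border test
-- (the 5-clause condition is the same source line in Source A and Source B; `pyGet?` returning `none`
--  on a too-short row counts as "≠ val" here — Python raises there, excluded by Pre_)
def pvDirs : List (Int × Int) := [(-1, 0), (0, -1), (0, 1), (1, 0)]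

abbrev pvBorder (g : List (List String)) (val : String) (q : Int × Int) : Prop :=
  q.1 < 0 ∨ (g.length : Int) ≤ q.1 ∨ q.2 < 0 ∨ ((g.headD []).length : Int) ≤ q.2 ∨
    (PySem.List.pyGet? g q.1).bind (fun row => PySem.List.pyGet? row q.2) ≠ some val

-- ===== PORT A =====
-- A's recursion threads the mutated `visited` set, so the helper returns it as a third component.
-- Fuel makes the recursion total; sufficiency of the fuel chosen by the wrapper is proved below
-- (pvSuffR); `gardens[r][c] = "."` affects no value A ever reads, so the pure port omits it.
mutual
def crawlA (g : List (List String)) (val : String) :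
    Nat → Int × Int → List (Int × Int) → Option (Int × Int × List (Int × Int))
  | 0, _, _ => none
  | f + 1, p, vis => crawlDirsA g val f p pvDirs (1, 0, PySem.Set.add vis p)
termination_by f => (f, 0)

def crawlDirsA (g : List (List String)) (val : String) (f : Nat) (p : Int × Int) :
    List (Int × Int) → Int × Int × List (Int × Int) → Option (Int × Int × List (Int × Int))
  | [], st => some st
  | d :: ds, (a, b, vis) =>
    if vis.contains (p.1 + d.1, p.2 + d.2) then crawlDirsA g val f p ds (a, b, vis)
    else if pvBorder g val (p.1 + d.1, p.2 + d.2) then crawlDirsA g val f p ds (a, b + 1, vis)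
    else
      match crawlA g val f (p.1 + d.1, p.2 + d.2) vis with
      | none => none
      | some (a2, b2, v2) => crawlDirsA g val f p ds (a + a2, b + b2, v2)
termination_by ds _ => (f, ds.length + 1)
end

def crawl_plot (gardens : List (List String)) (r : Int) (c : Int)
    (visited : Option (List (Int × Int))) : Int × Int :=
  match (PySem.List.pyGet? gardens r).bind (fun row => PySem.List.pyGet? row c) with
  | none => (0, 0)   -- Python raises IndexError here; outside Pre_
  | some val =>
    match crawlA gardens val (gardens.length * (gardens.headD []).length + 2) (r, c)
        (visited.getD []) with
    | none => (0, 0)   -- fuel exhausted: proved unreachable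
    | some (a, b, _) => (a, b)

-- ===== PORT B =====
-- the in-bounds grid coordinates and the count of those not yet visited (termination measure of B's loop)
def pvCells (g : List (List String)) : List (Int × Int) :=
  (List.range g.length).flatMap (fun (i : Nat) =>
    (List.range (g.headD []).length).map (fun (j : Nat) => ((i : Int), (j : Int))))

def pvUnseen (g : List (List String)) (vis : List (Int × Int)) : Nat :=
  ((pvCells g).filter (fun x => !vis.contains x)).length

theorem pvUnseen_add_lt (g : List (List String)) (vis : List (Int × Int)) (q : Int × Int)
    (hq : q ∈ pvCells g) (hv : vis.contains q = false) :
    pvUnseen g (PySem.Set.add vis q) < pvUnseen g vis := by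
  unfold pvUnseen
  have hadd : ∀ x : Int × Int, x ∈ PySem.Set.add vis q ↔ x ∈ vis ∨ x = q :=
    fun x => PySem.Set.mem_add vis q x
  have hsplit : (pvCells g).filter (fun x => !List.contains (PySem.Set.add vis q) x)
      = ((pvCells g).filter (fun x => !List.contains vis x)).filter
          (fun x => !List.contains (PySem.Set.add vis q) x) := by
    rw [List.filter_filter]
    apply List.filter_congr
    intro x _
    by_cases hx : x ∈ PySem.Set.add vis q
    · simp [List.contains_eq_mem, hx]
    · have hxv : x ∉ vis := fun h => hx ((hadd x).2 (Or.inl h))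
      simp [List.contains_eq_mem, hx, hxv]
  rw [hsplit]
  rw [List.length_filter_lt_length_iff_exists]
  refine ⟨q, ?_, ?_⟩
  · simp only [List.mem_filter]
    refine ⟨hq, by simp; simpa [List.contains_eq_mem] using hv⟩
  · have : q ∈ PySem.Set.add vis q := (hadd q).2 (Or.inr rfl)
    simp [List.contains_eq_mem, this]

theorem pvMem_cells (g : List (List String)) (q : Int × Int)
    (h1 : 0 ≤ q.1) (h2 : q.1 < (g.length : Int)) (h3 : 0 ≤ q.2)
    (h4 : q.2 < ((g.headD []).length : Int)) : q ∈ pvCells g := by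
  have hr : q.1.toNat < g.length := by omega
  have hc : q.2.toNat < (g.headD []).length := by omega
  have hm : ((q.1.toNat : Int), (q.2.toNat : Int)) ∈ pvCells g := by
    unfold pvCells
    exact List.mem_flatMap.2 ⟨q.1.toNat, List.mem_range.2 hr,
      List.mem_map.2 ⟨q.2.toNat, List.mem_range.2 hc, rfl⟩⟩
  have ee : ((q.1.toNat : Int), (q.2.toNat : Int)) = q := by cases q; simp_all
  rwa [ee] at hm

-- B's loop: the Lean stack head is the Python stack top (Source B pushes the four neighbours reversed,
-- so pops come in pvDirs order, which is this list prepended head-first).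
def crawlLoopB (g : List (List String)) (val : String) :
    List (Int × Int) → Int → Int → List (Int × Int) → Int × Int
  | [], area, borders, _ => (area, borders)
  | q :: stack, area, borders, vis =>
    if vis.contains q then crawlLoopB g val stack area borders vis
    else if h : pvBorder g val q then crawlLoopB g val stack area (borders + 1) vis
    else
      crawlLoopB g val (pvDirs.map (fun d => (q.1 + d.1, q.2 + d.2)) ++ stack)
        (area + 1) borders (PySem.Set.add vis q)
termination_by stack _ _ vis => (pvUnseen g vis, stack.length)
decreasing_by
  · exact Prod.Lex.right _ (by simp)
  · exact Prod.Lex.right _ (by simp)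
  · apply Prod.Lex.left
    apply pvUnseen_add_lt
    · apply pvMem_cells <;> push_neg at h <;> omega
    · simp_all
-- region collection and the final blanking of the grid are pure-value no-ops, omitted as in port A

def crawl_plot_alt (gardens : List (List String)) (r : Int) (c : Int)
    (visited : Option (List (Int × Int))) : Int × Int :=
  match (PySem.List.pyGet? gardens r).bind (fun row => PySem.List.pyGet? row c) with
  | none => (0, 0)   -- Python raises IndexError here; outside Pre_
  | some val =>
    crawlLoopB gardens val (pvDirs.map (fun d => (r + d.1, c + d.2))) 1 0
      (PySem.Set.add (visited.getD []) (r, c))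

-- ===== PRECONDITION & SPEC =====
-- Pre_ excludes exactly the raising inputs (IndexError): an out-of-range start index, and — since the
-- crawl bounds columns by len(gardens[0]) but then indexes the actual row — any row shorter than the
-- first (a sufficient closed-form shape condition; a few ragged grids whose crawl happens not to reach
-- a short row are excluded although A returns there).
def Pre_crawl_plot (gardens : List (List String)) (r : Int) (c : Int)
    (visited : Option (List (Int × Int))) : Prop :=
  gardens ≠ [] ∧
  (∀ row ∈ gardens, (gardens.headD []).length ≤ row.length) ∧
  PySem.Raise.InRange gardens.length r ∧
  PySem.Raise.InRange (PySem.List.pyGetD gardens r []).length c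
instance (gardens : List (List String)) (r : Int) (c : Int) (visited : Option (List (Int × Int))) : Decidable (Pre_crawl_plot gardens r c visited) := by unfold Pre_crawl_plot; infer_instance

def pvWitness_crawl_plot : List (List String) × Int × Int × (Option (List (Int × Int))) :=
  ([["a", "a"], ["a", "b"]], 0, 0, none)

def Spec_crawl_plot (gardens : List (List String)) (r : Int) (c : Int) (visited : Option (List (Int × Int))) (out : Int × Int) : Prop := out = crawl_plot_alt gardens r c visited
instance (gardens : List (List String)) (r : Int) (c : Int) (visited : Option (List (Int × Int))) (out : Int × Int) : Decidable (Spec_crawl_plot gardens r c visited out) := by unfold Spec_crawl_plot; infer_instance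

-- ===== CLAIM (what is proved, stated in full; the proofs are below) =====
def Claim_equal_crawl_plot : Prop := ∀ (gardens : List (List String)) (r : Int) (c : Int) (visited : Option (List (Int × Int))), Dom_crawl_plot gardens r c visited → Pre_crawl_plot gardens r c visited → Spec_crawl_plot gardens r c visited (crawl_plot gardens r c visited)

-- ===== LEMMAS AND PROOFS =====

theorem pvContains_add (vis : List (Int × Int)) (p x : Int × Int)
    (h : List.contains vis x = true) : List.contains (PySem.Set.add vis p) x = true := by
  have hm : x ∈ vis := by simpa [List.contains_eq_mem] using h
  have hx : x ∈ PySem.Set.add vis p := (PySem.Set.mem_add vis p x).2 (Or.inl hm)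
  simpa [List.contains_eq_mem] using hx

theorem pvUnseen_mono (g : List (List String)) (vis v : List (Int × Int))
    (h : ∀ x, List.contains vis x = true → List.contains v x = true) :
    pvUnseen g v ≤ pvUnseen g vis := by
  unfold pvUnseen
  rw [← List.countP_eq_length_filter, ← List.countP_eq_length_filter]
  apply List.countP_mono_left
  intro x _ hx
  simp only [Bool.not_eq_true'] at hx ⊢
  cases hcv : List.contains vis x
  · rfl
  · exact absurd (h x hcv) (by simpa [List.contains_eq_mem] using hx)

theorem pvLen_cells (g : List (List String)) :
    (pvCells g).length = g.length * (g.headD []).length := by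
  simp [pvCells, List.length_flatMap, List.map_const']

-- visited only grows along A's recursion (dirs-fold half, at fixed fuel)
theorem pvMonoD (g : List (List String)) (val : String) (f : Nat)
    (hR : ∀ p vis out, crawlA g val f p vis = some out →
      ∀ x, List.contains vis x = true → List.contains out.2.2 x = true) :
    ∀ (ds : List (Int × Int)) (p : Int × Int) (a b : Int) (vis : List (Int × Int)) out,
      crawlDirsA g val f p ds (a, b, vis) = some out →
      ∀ x, List.contains vis x = true → List.contains out.2.2 x = true := by
  intro ds
  induction ds with
  | nil =>
    intro p a b vis out h x hx
    simp only [crawlDirsA, Option.some.injEq] at h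
    rw [← h]
    exact hx
  | cons d ds ih =>
    intro p a b vis out h x hx
    simp only [crawlDirsA] at h
    by_cases h1 : List.contains vis (p.1 + d.1, p.2 + d.2) = true
    · rw [if_pos h1] at h
      exact ih p a b vis out h x hx
    · rw [if_neg h1] at h
      by_cases h2 : pvBorder g val (p.1 + d.1, p.2 + d.2)
      · rw [if_pos h2] at h
        exact ih p a (b + 1) vis out h x hx
      · rw [if_neg h2] at h
        cases hA : crawlA g val f (p.1 + d.1, p.2 + d.2) vis with
        | none => rw [hA] at h; simp at h
        | some t =>
          obtain ⟨a2, b2, v2⟩ := t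
          rw [hA] at h
          exact ih p (a + a2) (b + b2) v2 out h x (hR _ _ _ hA x hx)

theorem pvMono (g : List (List String)) (val : String) :
    ∀ f : Nat,
      (∀ p vis out, crawlA g val f p vis = some out →
        ∀ x, List.contains vis x = true → List.contains out.2.2 x = true) ∧
      (∀ p ds a b vis out, crawlDirsA g val f p ds (a, b, vis) = some out →
        ∀ x, List.contains vis x = true → List.contains out.2.2 x = true) := by
  intro f
  induction f with
  | zero =>
    have hR : ∀ p vis out, crawlA g val 0 p vis = some out →
        ∀ x, List.contains vis x = true → List.contains out.2.2 x = true := by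
      intro p vis out h
      simp [crawlA] at h
    exact ⟨hR, fun p ds a b vis out => pvMonoD g val 0 hR ds p a b vis out⟩
  | succ f ih =>
    have hR1 : ∀ p vis out, crawlA g val (f + 1) p vis = some out →
        ∀ x, List.contains vis x = true → List.contains out.2.2 x = true := by
      intro p vis out h x hx
      simp only [crawlA] at h
      exact pvMonoD g val f ih.1 pvDirs p 1 0 (PySem.Set.add vis p) out h x
        (pvContains_add vis p x hx)
    exact ⟨hR1, fun p ds a b vis out => pvMonoD g val (f + 1) hR1 ds p a b vis out⟩

-- the wrapper's fuel suffices (dirs-fold half, at fixed fuel)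
theorem pvSuffD (g : List (List String)) (val : String) (f : Nat)
    (hR : ∀ p vis, p ∈ pvCells g → List.contains vis p = false → pvUnseen g vis < f →
      (crawlA g val f p vis).isSome) :
    ∀ (ds : List (Int × Int)) (p : Int × Int) (a b : Int) (vis : List (Int × Int)),
      pvUnseen g vis < f → (crawlDirsA g val f p ds (a, b, vis)).isSome := by
  intro ds
  induction ds with
  | nil =>
    intro p a b vis _
    simp [crawlDirsA]
  | cons d ds ih =>
    intro p a b vis hlt
    simp only [crawlDirsA]
    by_cases h1 : List.contains vis (p.1 + d.1, p.2 + d.2) = true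
    · rw [if_pos h1]
      exact ih p a b vis hlt
    · rw [if_neg h1]
      by_cases h2 : pvBorder g val (p.1 + d.1, p.2 + d.2)
      · rw [if_pos h2]
        exact ih p a (b + 1) vis hlt
      · rw [if_neg h2]
        have hq : (p.1 + d.1, p.2 + d.2) ∈ pvCells g := by
          unfold pvBorder at h2
          push_neg at h2
          obtain ⟨hh1, hh2, hh3, hh4, _⟩ := h2
          exact pvMem_cells g _ (by omega) (by omega) (by omega) (by omega)
        have hnc : List.contains vis (p.1 + d.1, p.2 + d.2) = false := by
          cases hcv : List.contains vis (p.1 + d.1, p.2 + d.2)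
          · rfl
          · exact absurd hcv h1
        obtain ⟨t, hA⟩ := Option.isSome_iff_exists.1 (hR _ vis hq hnc hlt)
        obtain ⟨a2, b2, v2⟩ := t
        simp only [hA]
        apply ih p (a + a2) (b + b2) v2
        have hmono := (pvMono g val f).1 _ _ _ hA
        exact Nat.lt_of_le_of_lt (pvUnseen_mono g vis v2 hmono) hlt |>.trans_le (le_refl _)

theorem pvSuff (g : List (List String)) (val : String) :
    ∀ f : Nat,
      (∀ p vis, p ∈ pvCells g → List.contains vis p = false → pvUnseen g vis < f →
        (crawlA g val f p vis).isSome) ∧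
      (∀ p ds a b vis, pvUnseen g vis < f →
        (crawlDirsA g val f p ds (a, b, vis)).isSome) := by
  intro f
  induction f with
  | zero =>
    have hR : ∀ p vis, p ∈ pvCells g → List.contains vis p = false → pvUnseen g vis < 0 →
        (crawlA g val 0 p vis).isSome := by
      intro p vis _ _ h
      exact absurd h (Nat.not_lt_zero _)
    exact ⟨hR, fun p ds a b vis => pvSuffD g val 0 hR ds p a b vis⟩
  | succ f ih =>
    have hR1 : ∀ p vis, p ∈ pvCells g → List.contains vis p = false →
        pvUnseen g vis < f + 1 → (crawlA g val (f + 1) p vis).isSome := by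
      intro p vis hp hnc hlt
      simp only [crawlA]
      apply pvSuffD g val f ih.1 pvDirs p 1 0 (PySem.Set.add vis p)
      have hdec := pvUnseen_add_lt g vis p hp hnc
      omega
    exact ⟨hR1, fun p ds a b vis => pvSuffD g val (f + 1) hR1 ds p a b vis⟩

theorem pvSuffTop (g : List (List String)) (val : String) (p : Int × Int)
    (vis : List (Int × Int)) :
    (crawlA g val (g.length * (g.headD []).length + 2) p vis).isSome := by
  simp only [crawlA]
  apply pvSuffD g val (g.length * (g.headD []).length + 1)
    (pvSuff g val (g.length * (g.headD []).length + 1)).1 pvDirs p 1 0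
  have h1 : pvUnseen g (PySem.Set.add vis p) ≤ (pvCells g).length :=
    List.length_filter_le _ _
  have h2 := pvLen_cells g
  omega

-- simulation: B's stack loop consumes exactly the work A's recursion performs (dirs-fold half)
theorem pvSimD (g : List (List String)) (val : String) (f : Nat)
    (hR : ∀ p vis a' b' v', crawlA g val f p vis = some (a', b', v') →
      ∀ rest ar bo,
        crawlLoopB g val (pvDirs.map (fun d => (p.1 + d.1, p.2 + d.2)) ++ rest) ar bo
            (PySem.Set.add vis p)
          = crawlLoopB g val rest (ar + (a' - 1)) (bo + b') v') :
    ∀ (ds : List (Int × Int)) (p : Int × Int) (a b : Int) (vis : List (Int × Int))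
      (a' b' : Int) (v' : List (Int × Int)),
      crawlDirsA g val f p ds (a, b, vis) = some (a', b', v') →
      ∀ rest ar bo,
        crawlLoopB g val (ds.map (fun d => (p.1 + d.1, p.2 + d.2)) ++ rest) ar bo vis
          = crawlLoopB g val rest (ar + (a' - a)) (bo + (b' - b)) v' := by
  intro ds
  induction ds with
  | nil =>
    intro p a b vis a' b' v' h rest ar bo
    simp only [crawlDirsA, Option.some.injEq, Prod.mk.injEq] at h
    obtain ⟨rfl, rfl, rfl⟩ := h
    simp
  | cons d ds ih =>
    intro p a b vis a' b' v' h rest ar bo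
    simp only [crawlDirsA] at h
    simp only [List.map_cons, List.cons_append]
    by_cases h1 : List.contains vis (p.1 + d.1, p.2 + d.2) = true
    · rw [if_pos h1] at h
      rw [crawlLoopB.eq_def]
      simp only [if_pos h1]
      exact ih p a b vis a' b' v' h rest ar bo
    · rw [if_neg h1] at h
      by_cases h2 : pvBorder g val (p.1 + d.1, p.2 + d.2)
      · rw [if_pos h2] at h
        rw [crawlLoopB.eq_def]
        simp only [if_neg h1, dif_pos h2]
        rw [ih p a (b + 1) vis a' b' v' h rest ar (bo + 1)]
        have e2 : bo + 1 + (b' - (b + 1)) = bo + (b' - b) := by ring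
        rw [e2]
      · rw [if_neg h2] at h
        rw [crawlLoopB.eq_def]
        simp only [if_neg h1, dif_neg h2]
        cases hA : crawlA g val f (p.1 + d.1, p.2 + d.2) vis with
        | none => rw [hA] at h; simp at h
        | some t =>
          obtain ⟨a2, b2, v2⟩ := t
          rw [hA] at h
          rw [hR (p.1 + d.1, p.2 + d.2) vis a2 b2 v2 hA
            (ds.map (fun d => (p.1 + d.1, p.2 + d.2)) ++ rest) (ar + 1) bo]
          rw [ih p (a + a2) (b + b2) v2 a' b' v' h rest (ar + 1 + (a2 - 1)) (bo + b2)]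
          have e1 : ar + 1 + (a2 - 1) + (a' - (a + a2)) = ar + (a' - a) := by ring
          have e2 : bo + b2 + (b' - (b + b2)) = bo + (b' - b) := by ring
          rw [e1, e2]

theorem pvSim (g : List (List String)) (val : String) :
    ∀ f : Nat,
      (∀ p vis a' b' v', crawlA g val f p vis = some (a', b', v') →
        ∀ rest ar bo,
          crawlLoopB g val (pvDirs.map (fun d => (p.1 + d.1, p.2 + d.2)) ++ rest) ar bo
              (PySem.Set.add vis p)
            = crawlLoopB g val rest (ar + (a' - 1)) (bo + b') v') ∧
      (∀ p ds a b vis a' b' v', crawlDirsA g val f p ds (a, b, vis) = some (a', b', v') →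
        ∀ rest ar bo,
          crawlLoopB g val (ds.map (fun d => (p.1 + d.1, p.2 + d.2)) ++ rest) ar bo vis
            = crawlLoopB g val rest (ar + (a' - a)) (bo + (b' - b)) v') := by
  intro f
  induction f with
  | zero =>
    have hR : ∀ p vis a' b' v', crawlA g val 0 p vis = some (a', b', v') →
        ∀ rest ar bo,
          crawlLoopB g val (pvDirs.map (fun d => (p.1 + d.1, p.2 + d.2)) ++ rest) ar bo
              (PySem.Set.add vis p)
            = crawlLoopB g val rest (ar + (a' - 1)) (bo + b') v' := by
      intro p vis a' b' v' h
      simp [crawlA] at h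
    exact ⟨hR, fun p ds a b vis a' b' v' => pvSimD g val 0 hR ds p a b vis a' b' v'⟩
  | succ f ih =>
    have hR1 : ∀ p vis a' b' v', crawlA g val (f + 1) p vis = some (a', b', v') →
        ∀ rest ar bo,
          crawlLoopB g val (pvDirs.map (fun d => (p.1 + d.1, p.2 + d.2)) ++ rest) ar bo
              (PySem.Set.add vis p)
            = crawlLoopB g val rest (ar + (a' - 1)) (bo + b') v' := by
      intro p vis a' b' v' h rest ar bo
      simp only [crawlA] at h
      have := pvSimD g val f ih.1 pvDirs p 1 0 (PySem.Set.add vis p) a' b' v' h rest ar bo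
      simpa using this
    exact ⟨hR1, fun p ds a b vis a' b' v' => pvSimD g val (f + 1) hR1 ds p a b vis a' b' v'⟩

-- ===== VERDICT (by name: the statement is the Claim_ definition above) =====
theorem crawl_plot_spec : Claim_equal_crawl_plot := by
  intro gardens r c visited _ hpre
  unfold Spec_crawl_plot
  obtain ⟨hne, hrows, hr, hc⟩ := hpre
  have hrow : PySem.List.pyGet? gardens r ≠ none := by
    rw [Ne, PySem.List.pyGet?_eq_none_iff]
    exact fun h => h hr
  obtain ⟨row, hrowe⟩ := Option.ne_none_iff_exists'.1 hrow
  have hrowD : PySem.List.pyGetD gardens r [] = row := by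
    simp [PySem.List.pyGetD, hrowe]
  rw [hrowD] at hc
  have hcell : PySem.List.pyGet? row c ≠ none := by
    rw [Ne, PySem.List.pyGet?_eq_none_iff]
    exact fun h => h hc
  obtain ⟨v, hve⟩ := Option.ne_none_iff_exists'.1 hcell
  have hbind : (PySem.List.pyGet? gardens r).bind
      (fun row => PySem.List.pyGet? row c) = some v := by
    rw [hrowe]
    simpa using hve
  obtain ⟨t, hA⟩ := Option.isSome_iff_exists.1
    (pvSuffTop gardens v (r, c) (visited.getD []))
  obtain ⟨a, b, vfin⟩ := t
  have hAv : crawl_plot gardens r c visited = (a, b) := by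
    simp only [crawl_plot, hbind, hA]
  have hsim := (pvSim gardens v (gardens.length * (gardens.headD []).length + 2)).1
    (r, c) (visited.getD []) a b vfin hA [] 1 0
  simp only [List.append_nil] at hsim
  have hBv : crawl_plot_alt gardens r c visited = (a, b) := by
    simp only [crawl_plot_alt, hbind]
    show crawlLoopB gardens v
        (List.map (fun d => ((r, c).1 + d.1, (r, c).2 + d.2)) pvDirs) 1 0
        (PySem.Set.add (visited.getD []) (r, c)) = (a, b)
    rw [hsim]
    simp only [crawlLoopB, Prod.mk.injEq]
    exact ⟨by ring, by ring⟩
  rw [hAv, hBv]
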